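-- pv_equiv track=rewrite | github.com/alvaroHino10/leetcode_interview | product_of_array_except_self.py | suffix_and_prefix_product
-- ===== SOURCE A (Python) =====
-- from typing import List, Tuple
--
-- def suffix_and_prefix_product(nums: List[int]) -> Tuple[List[int], List[int]]:
--     """
--         Calcula el producto de todos los elementos iniciando en izquierda y derecha o el final.
--         Se puede hacer el mismo procedimiento de sufix product y prefix product, pero se hace en un solo paso. Asi
--         se evita recorrer la lista dos veces, minimizando el tiempo de ejecucion.
--     :param nums: List[int]: Lista de numeros
--     :return: Tuple[List[int], List[int]]: Tupla con el producto de todos los elementos prefix y suffix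
--         respectivamente
--     """
--     n = len(nums)
--     prefix, sufix = [1] * n, [1] * n
--     prefix[0] = nums[0]
--     sufix[-1] = nums[-1]
--     for i in range(1, n):
--         prefix[i] = prefix[i - 1] * nums[i]
--         sufix[n - i - 1] = sufix[n - i] * nums[n - i - 1]
--     return prefix, sufix
-- ===== SOURCE B (Python) =====
-- from typing import List, Tuple
--
-- def suffix_and_prefix_product(nums: List[int]) -> Tuple[List[int], List[int]]:
--     """Structural recursion on the list: for nums = [h] + t, the prefix array is
--     h followed by every element of t's prefix array scaled by h, and the suffix
--     array is (h * first suffix product of t) prepended to t's suffix array.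
--     Raises IndexError on [] (nums[0]), like A."""
--     def go(xs):
--         h, t = xs[0], xs[1:]
--         if not t:
--             return [h], [h]
--         p, s = go(t)
--         return [h] + [h * x for x in p], [h * s[0]] + s
--     return go(nums)
-- ===== Notes on version B (the rewrite author's own statement) =====
-- stated objective: alternative
-- what changed: Replaces A's single interleaved index loop over preallocated ones-arrays with a structural recursion on the list that builds both arrays from the tail's answer: prefix = head followed by the tail's prefix array scaled by head, suffix = head times the tail's first suffix product prepended to the tail's suffix array.
import Mathlib
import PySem

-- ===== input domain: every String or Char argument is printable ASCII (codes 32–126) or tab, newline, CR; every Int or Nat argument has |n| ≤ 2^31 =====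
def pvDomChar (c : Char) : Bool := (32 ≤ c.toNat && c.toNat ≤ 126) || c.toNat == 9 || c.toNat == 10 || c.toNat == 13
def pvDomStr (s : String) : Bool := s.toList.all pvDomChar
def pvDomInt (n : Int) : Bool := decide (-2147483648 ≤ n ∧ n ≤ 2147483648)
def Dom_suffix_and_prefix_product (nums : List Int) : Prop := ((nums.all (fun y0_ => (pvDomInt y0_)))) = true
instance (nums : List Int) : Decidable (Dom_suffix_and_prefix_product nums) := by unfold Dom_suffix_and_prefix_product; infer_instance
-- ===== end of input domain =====

-- B replaces A's single interleaved index loop over preallocated arrays with a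
-- structural recursion building both arrays from the tail's answer (prefix of
-- tail scaled by the head; head*first suffix prepended); objective: alternative
-- (B is O(n^2) due to the per-step rescaling, A is O(n)). Pre_ excludes [] where
-- both programs raise IndexError.


-- ===== PORT A =====
def suffix_and_prefix_product (nums : List Int) : List Int × List Int :=
  let n : Int := nums.length
  let prefix0 : List Int := List.replicate nums.length 1
  let sufix0 : List Int := List.replicate nums.length 1
  let prefix1 := prefix0.set 0 (PySem.List.pyGetD nums 0 1)
  let sufix1 := sufix0.set (nums.length - 1) (PySem.List.pyGetD nums (-1) 1)
  (PySem.List.pyRange 1 n).foldl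
    (fun st i =>
      (st.1.set i.toNat (PySem.List.pyGetD st.1 (i - 1) 1 * PySem.List.pyGetD nums i 1),
       st.2.set (n - i - 1).toNat
         (PySem.List.pyGetD st.2 (n - i) 1 * PySem.List.pyGetD nums (n - i - 1) 1)))
    (prefix1, sufix1)

-- ===== PORT B =====
-- Source B's recursive helper 'go'; the [] case is Python's IndexError at xs[0]
-- (excluded by Pre_, and never reached by the recursion: the t = [] branch stops it).
-- s[0] is read as headD 1: s is the nonempty recursive result, so the default is never used.
def pvGo : List Int → List Int × List Int
  | [] => ([], [])
  | h :: t =>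
    match t with
    | [] => ([h], [h])
    | _ :: _ =>
      let r := pvGo t
      (h :: r.1.map (fun x => h * x), (h * r.2.headD 1) :: r.2)

def suffix_and_prefix_product_alt (nums : List Int) : List Int × List Int :=
  pvGo nums

-- ===== PRECONDITION & SPEC =====
-- Pre_ excludes only the empty list, on which A raises IndexError at its first-element access.
def Pre_suffix_and_prefix_product (nums : List Int) : Prop := nums ≠ []
instance (nums : List Int) : Decidable (Pre_suffix_and_prefix_product nums) := by unfold Pre_suffix_and_prefix_product; infer_instance
def pvWitness_suffix_and_prefix_product : List Int := [2, -3, 5]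

def Spec_suffix_and_prefix_product (nums : List Int) (out : List Int × List Int) : Prop := out = suffix_and_prefix_product_alt nums
instance (nums : List Int) (out : List Int × List Int) : Decidable (Spec_suffix_and_prefix_product nums out) := by unfold Spec_suffix_and_prefix_product; infer_instance

-- ===== CLAIM (what is proved, stated in full; the proofs are below) =====
def Claim_equal_suffix_and_prefix_product : Prop := ∀ (nums : List Int), Dom_suffix_and_prefix_product nums → Pre_suffix_and_prefix_product nums → Spec_suffix_and_prefix_product nums (suffix_and_prefix_product nums)

-- ===== LEMMAS AND PROOFS =====

-- reference specs: prefix[j] = prod nums[0..j], suffix[j] = prod nums[j..]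
def specP (nums : List Int) : List Int :=
  (List.range nums.length).map (fun j => (nums.take (j + 1)).prod)
def specS (nums : List Int) : List Int :=
  (List.range nums.length).map (fun j => (nums.drop j).prod)

lemma specP_cons (h : Int) (t : List Int) :
    specP (h :: t) = h :: (specP t).map (fun x => h * x) := by
  simp [specP, List.range_succ_eq_map, List.map_map, Function.comp, List.take_succ_cons]

lemma specS_head (t : List Int) (ht : t ≠ []) : (specS t).headD 1 = t.prod := by
  cases t with
  | nil => simp at ht
  | cons a s => simp [specS, List.range_succ_eq_map]

lemma specS_cons (h : Int) (t : List Int) :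
    specS (h :: t) = (h * t.prod) :: specS t := by
  simp [specS, List.range_succ_eq_map, List.map_map, Function.comp]

lemma pvGo_eq_spec (nums : List Int) (hne : nums ≠ []) :
    pvGo nums = (specP nums, specS nums) := by
  induction nums with
  | nil => simp at hne
  | cons h t ih =>
    cases t with
    | nil => simp [pvGo, specP, specS]
    | cons a s =>
      have ht : a :: s ≠ [] := by simp
      have hstep : pvGo (h :: a :: s)
          = (h :: (pvGo (a :: s)).1.map (fun x => h * x),
             (h * (pvGo (a :: s)).2.headD 1) :: (pvGo (a :: s)).2) := rfl
      rw [hstep, ih ht]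
      dsimp only
      rw [specS_head (a :: s) ht, specP_cons h (a :: s), specS_cons h (a :: s)]

lemma alt_eq_spec (nums : List Int) (hne : nums ≠ []) :
    suffix_and_prefix_product_alt nums = (specP nums, specS nums) := by
  simp [suffix_and_prefix_product_alt, pvGo_eq_spec nums hne]

lemma A_prefix_loop (nums : List Int) : ∀ (k : Nat), k + 1 ≤ nums.length →
    (PySem.List.pyRange 1 ((k : Int) + 1)).foldl
        (fun p i => p.set i.toNat (PySem.List.pyGetD p (i - 1) 1 * PySem.List.pyGetD nums i 1))
        ((List.replicate nums.length (1 : Int)).set 0 (PySem.List.pyGetD nums 0 1))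
      = (List.range (k + 1)).map (fun j => (nums.take (j + 1)).prod)
          ++ List.replicate (nums.length - (k + 1)) 1 := by
  intro k
  induction k with
  | zero =>
    intro h
    rw [show ((0:Nat):Int) + 1 = 1 by norm_num, PySem.List.pyRange_one_eq_nil le_rfl]
    match nums, h with
    | x :: t, _ =>
      simp [List.replicate_succ, PySem.List.pyGetD, PySem.List.pyGet?, PySem.List.pyIdx?]
  | succ k ih =>
    intro h
    have hk : k + 1 ≤ nums.length := by omega
    rw [show ((k+1:Nat):Int) + 1 = ((k:Int)+1) + 1 by push_cast; ring,
        PySem.List.pyRange_one_succ_right (by omega), List.foldl_append]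
    rw [ih hk]
    simp only [List.foldl_cons, List.foldl_nil]
    have h1 : ((k:Int) + 1).toNat = k + 1 := by omega
    have h2 : (k:Int) + 1 - 1 = ((k:Nat):Int) := by ring
    have h3 : (k:Int) + 1 = ((k+1:Nat):Int) := by push_cast; ring
    rw [h1, h2, h3, PySem.List.pyGetD_natCast, PySem.List.pyGetD_natCast]
    have hlenM : ((List.range (k + 1)).map (fun j => (nums.take (j + 1)).prod)).length = k + 1 := by simp
    rw [List.getD_append _ _ _ _ (by omega), PySem.List.getD_map_range _ _ _ _ (by omega)]
    have hrep : nums.length - (k+1) = (nums.length - (k+2)) + 1 := by omega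
    rw [List.set_append, if_neg (by omega), hlenM, hrep, List.replicate_succ]
    rw [show k + 1 - (k + 1) = 0 by omega, List.set_cons_zero]
    have hget : nums.getD (k+1) 1 = nums[k+1]'(by omega) := List.getD_eq_getElem _ _ _
    rw [hget]
    have htake : nums.take (k+1+1) = nums.take (k+1) ++ [nums[k+1]'(by omega)] := by
      rw [List.take_add_one, List.getElem?_eq_getElem (by omega)]; rfl
    rw [show List.range (k+1+1) = List.range (k+1) ++ [k+1] from List.range_succ, List.map_append]
    rw [List.append_assoc]
    congr 1
    simp only [List.map_cons, List.map_nil, List.singleton_append, htake, List.prod_append,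
      List.prod_cons, List.prod_nil, mul_one]

lemma A_suffix_loop (nums : List Int) (hne : nums ≠ []) : ∀ (k : Nat), k + 1 ≤ nums.length →
    (PySem.List.pyRange 1 ((k : Int) + 1)).foldl
        (fun s i => s.set ((nums.length : Int) - i - 1).toNat
          (PySem.List.pyGetD s ((nums.length : Int) - i) 1 *
           PySem.List.pyGetD nums ((nums.length : Int) - i - 1) 1))
        ((List.replicate nums.length (1 : Int)).set (nums.length - 1) (PySem.List.pyGetD nums (-1) 1))
      = List.replicate (nums.length - (k + 1)) 1
          ++ (List.range (k + 1)).map (fun t => (nums.drop (nums.length - (k + 1) + t)).prod) := by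
  have hgetneg : PySem.List.pyGetD nums (-1) 1 = nums.getD (nums.length - 1) 1 := by
    cases nums with
    | nil => simp at hne
    | cons a t => simp [PySem.List.pyGetD, PySem.List.pyGet?, PySem.List.pyIdx?]
  have hlast : nums.drop (nums.length - 1) = [nums.getD (nums.length - 1) 1] := by
    have hlt : nums.length - 1 < nums.length := by
      have hz : nums.length ≠ 0 := fun h0 => hne (List.eq_nil_of_length_eq_zero h0)
      omega
    rw [List.drop_eq_getElem_cons hlt, List.getD_eq_getElem _ _ hlt]
    have : nums.length - 1 + 1 = nums.length := by omega
    rw [this, List.drop_length]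
  intro k
  induction k with
  | zero =>
    intro h
    rw [show ((0:Nat):Int) + 1 = 1 by norm_num, PySem.List.pyRange_one_eq_nil le_rfl]
    simp only [List.foldl_nil, hgetneg]
    rw [show nums.length = (nums.length - 1) + 1 by omega, List.replicate_succ', List.set_append,
        if_neg (by simp), List.length_replicate]
    simp [hlast]
  | succ k ih =>
    intro h
    have hk : k + 1 ≤ nums.length := by omega
    rw [show ((k+1:Nat):Int) + 1 = ((k:Int)+1) + 1 by push_cast; ring,
        PySem.List.pyRange_one_succ_right (by omega), List.foldl_append, ih hk]
    simp only [List.foldl_cons, List.foldl_nil]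
    have hc1 : (nums.length : Int) - ((k:Int)+1) - 1 = ((nums.length - k - 2 : Nat) : Int) := by omega
    have hc2 : (nums.length : Int) - ((k:Int)+1) = ((nums.length - k - 1 : Nat) : Int) := by omega
    rw [hc1, hc2, Int.toNat_natCast, PySem.List.pyGetD_natCast, PySem.List.pyGetD_natCast]
    set m := nums.length - k - 2 with hm
    have hrep : nums.length - (k + 1) = m + 1 := by omega
    rw [hrep]
    have hlenR : (List.replicate (m + 1) (1:Int)).length = m + 1 := List.length_replicate
    rw [List.getD_append_right _ _ _ _ (by rw [hlenR]; omega)]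
    rw [hlenR, show nums.length - k - 1 - (m + 1) = 0 by omega,
        PySem.List.getD_map_range _ _ _ _ (by omega)]
    rw [List.replicate_succ', List.append_assoc, List.set_append, if_neg (by simp), List.length_replicate,
        show m - m = 0 by omega]
    simp only [List.singleton_append, List.set_cons_zero]
    have hdropm : nums.drop m = nums[m]'(by omega) :: nums.drop (m + 1) := List.drop_eq_getElem_cons (by omega)
    have hgetm : nums.getD m 1 = nums[m]'(by omega) := List.getD_eq_getElem _ _ _
    have hidx : nums.length - (k + 1) + 0 = m + 1 := by omega
    rw [show nums.length - (k + 1 + 1) = m by omega]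
    congr 1
    conv_rhs => rw [List.range_succ_eq_map, List.map_cons, List.map_map]
    congr 1
    · rw [hgetm, show m + 0 = m by omega, hdropm, List.prod_cons,
          show m + 1 + 0 = m + 1 by omega]
      ring
    · apply List.map_congr_left
      intro t _
      simp only [Function.comp]
      congr 2
      omega

lemma A_eq_spec (nums : List Int) (hne : nums ≠ []) :
    suffix_and_prefix_product nums = (specP nums, specS nums) := by
  have hn : 1 ≤ nums.length := List.length_pos_of_ne_nil hne
  simp only [suffix_and_prefix_product]
  refine Eq.trans (PySem.List.foldl_prod_mk
        (fun (p : List Int) (i : Int) => p.set i.toNat (PySem.List.pyGetD p (i - 1) 1 * PySem.List.pyGetD nums i 1))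
        (fun (s : List Int) (i : Int) => s.set ((nums.length : Int) - i - 1).toNat
          (PySem.List.pyGetD s ((nums.length : Int) - i) 1 *
           PySem.List.pyGetD nums ((nums.length : Int) - i - 1) 1)) _ _ _) ?_
  rw [show PySem.List.pyRange 1 (nums.length : Int)
        = PySem.List.pyRange 1 (((nums.length - 1 : Nat) : Int) + 1) by
      congr 1; omega]
  rw [A_prefix_loop nums (nums.length - 1) (by omega),
      A_suffix_loop nums hne (nums.length - 1) (by omega)]
  rw [show nums.length - 1 + 1 = nums.length by omega]
  simp [specP, specS]

-- ===== VERDICT (by name: the statement is the Claim_ definition above) =====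
theorem suffix_and_prefix_product_spec : Claim_equal_suffix_and_prefix_product := by
  intro nums _ hpre
  unfold Spec_suffix_and_prefix_product
  rw [A_eq_spec nums hpre, alt_eq_spec nums hpre]
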